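-- pv_equiv track=rewrite | github.com/LLCHARLES/qq-music-decrypt-api | api/lyrics.py | extract_plain_text_from_yrc
-- ===== SOURCE A (Python) =====
-- def extract_plain_text_from_yrc(yrc_content):
--     """从YRC内容中提取纯文本（移除时间标记）"""
--     if not yrc_content:
--         return ''
--
--     plain_text = ''
--     current_pos = 0
--
--     while current_pos < len(yrc_content):
--         paren_index = yrc_content.find('(', current_pos)
--
--         if paren_index == -1:
--             plain_text += yrc_content[current_pos:]
--             break
--
--         plain_text += yrc_content[current_pos:paren_index]
--
--         close_paren_index = yrc_content.find(')', paren_index)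
--         if close_paren_index == -1:
--             break
--
--         current_pos = close_paren_index + 1
--
--     return plain_text.strip()
-- ===== SOURCE B (Python) =====
-- def extract_plain_text_from_yrc(yrc_content):
--     """从YRC内容中提取纯文本（移除时间标记）"""
--     if not yrc_content:
--         return ''
--     inside = False
--     result = []
--     for ch in yrc_content:
--         if not inside and ch == '(':
--             inside = True
--         elif inside and ch == ')':
--             inside = False
--         elif inside:
--             pass
--         else:
--             result.append(ch)
--     return ''.join(result).strip()
-- ===== Notes on version B (the rewrite author's own statement) =====
-- stated objective: idiomatic
-- what changed: Replaces A's find-based chunk jumping (repeated str.find with slice concatenation) by a single per-character pass maintaining a boolean in/out state flag.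
import Mathlib
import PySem

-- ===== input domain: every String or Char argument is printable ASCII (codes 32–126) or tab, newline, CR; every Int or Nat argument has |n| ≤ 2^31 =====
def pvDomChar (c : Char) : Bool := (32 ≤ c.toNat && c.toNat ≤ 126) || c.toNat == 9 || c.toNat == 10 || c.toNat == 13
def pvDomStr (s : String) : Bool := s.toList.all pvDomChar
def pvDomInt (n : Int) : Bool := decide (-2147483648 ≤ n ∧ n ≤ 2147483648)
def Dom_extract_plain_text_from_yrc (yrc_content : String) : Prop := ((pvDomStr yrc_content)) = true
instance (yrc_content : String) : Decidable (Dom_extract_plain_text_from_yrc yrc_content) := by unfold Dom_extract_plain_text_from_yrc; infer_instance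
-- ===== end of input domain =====

-- B replaces A's find-based chunk jumping by a single per-character state-machine pass (idiomatic; same O(n) cost).


-- ===== PORT A =====
-- A's while-loop, kept as find-based chunk jumping; the loop state is the accumulated
-- plain text plus the still-unscanned suffix (yrc_content[current_pos:]), so
-- yrc_content.find('(', current_pos) / find(')', paren_index) become
-- Chars.find on the suffix / Chars.findFrom from the '(' index in the suffix.
def pvLoopA (plain : List Char) (rest : List Char) : List Char :=
  if _h : rest.length = 0 then plain
  else
    let paren := PySem.Chars.find rest ['(']
    if paren = -1 then plain ++ rest
    else
      let plain' := plain ++ rest.take paren.toNat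
      let closeParen := PySem.Chars.findFrom rest [')'] paren none
      if _hc : closeParen = -1 then plain'
      else pvLoopA plain' (rest.drop (closeParen.toNat + 1))
termination_by rest.length
decreasing_by simp [List.length_drop]; omega

def extract_plain_text_from_yrc (yrc_content : String) : String :=
  if yrc_content.toList = [] then ""
  else String.ofList (PySem.Chars.strip (pvLoopA [] yrc_content.toList))

-- ===== PORT B =====
-- Source B: single pass with an `inside` boolean and a result list, then ''.join(...).strip().
def pvStepB (st : Bool × List Char) (ch : Char) : Bool × List Char :=
  if !st.1 && ch == '(' then (true, st.2)
  else if st.1 && ch == ')' then (false, st.2)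
  else if st.1 then st
  else (st.1, st.2 ++ [ch])

def extract_plain_text_from_yrc_alt (yrc_content : String) : String :=
  if yrc_content.toList = [] then ""
  else
    let st := yrc_content.toList.foldl pvStepB (false, [])
    String.ofList (PySem.Chars.strip st.2)

-- ===== PRECONDITION & SPEC =====
def Spec_extract_plain_text_from_yrc (yrc_content : String) (out : String) : Prop := out = extract_plain_text_from_yrc_alt yrc_content
instance (yrc_content : String) (out : String) : Decidable (Spec_extract_plain_text_from_yrc yrc_content out) := by unfold Spec_extract_plain_text_from_yrc; infer_instance

-- ===== CLAIM (what is proved, stated in full; the proofs are below) =====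
def Claim_equal_extract_plain_text_from_yrc : Prop := ∀ (yrc_content : String), Dom_extract_plain_text_from_yrc yrc_content → Spec_extract_plain_text_from_yrc yrc_content (extract_plain_text_from_yrc yrc_content)

-- ===== LEMMAS AND PROOFS =====

/-- Reference state machine: the text kept outside parenthesized segments. -/
def pvScan : Bool → List Char → List Char
  | _, [] => []
  | false, c :: cs => if c = '(' then pvScan true cs else c :: pvScan false cs
  | true, c :: cs => if c = ')' then pvScan false cs else pvScan true cs

theorem pvScan_false_of_not_mem {cs : List Char} (h : '(' ∉ cs) :
    pvScan false cs = cs := by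
  induction cs with
  | nil => rfl
  | cons c cs ih =>
    simp only [List.mem_cons, not_or] at h
    simp [pvScan, Ne.symm h.1, ih h.2]

theorem pvScan_false_append {a b : List Char} (h : '(' ∉ a) :
    pvScan false (a ++ '(' :: b) = a ++ pvScan true b := by
  induction a with
  | nil => simp [pvScan]
  | cons c a ih =>
    simp only [List.mem_cons, not_or] at h
    simp [pvScan, Ne.symm h.1, ih h.2]

theorem pvScan_true_of_not_mem {cs : List Char} (h : ')' ∉ cs) :
    pvScan true cs = [] := by
  induction cs with
  | nil => rfl
  | cons c cs ih =>
    simp only [List.mem_cons, not_or] at h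
    simp [pvScan, Ne.symm h.1, ih h.2]

theorem pvScan_true_append {c d : List Char} (h : ')' ∉ c) :
    pvScan true (c ++ ')' :: d) = pvScan false d := by
  induction c with
  | nil => simp [pvScan]
  | cons x c ih =>
    simp only [List.mem_cons, not_or] at h
    simp [pvScan, Ne.symm h.1, ih h.2]

theorem pvSingleton_prefix_iff (c : Char) (l : List Char) :
    [c] <+: l ↔ l.head? = some c := by
  cases l with
  | nil => simp
  | cons x xs =>
    constructor
    · rintro ⟨t, ht⟩
      simp at ht; simp [ht.1]
    · intro h; simp at h; exact ⟨xs, by simp [h]⟩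

/-- `Chars.find` of a single character points at its first occurrence. -/
theorem pvFind_single_spec {cs : List Char} {c : Char} (h : c ∈ cs) :
    ∃ n : Nat, PySem.Chars.find cs [c] = (n : Int) ∧ n < cs.length ∧
      cs.drop n = c :: cs.drop (n + 1) ∧ c ∉ cs.take n := by
  have hinf : [c] <:+: cs := by
    obtain ⟨a, b, rfl⟩ := List.append_of_mem h
    exact ⟨a, b, by simp⟩
  have hnn : 0 ≤ PySem.Chars.find cs [c] := (PySem.Chars.find_nonneg_iff cs [c]).2 hinf
  obtain ⟨hpre, hmin⟩ := PySem.Chars.find_spec hnn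
  set n := (PySem.Chars.find cs [c]).toNat with hn
  rw [pvSingleton_prefix_iff] at hpre
  refine ⟨n, (Int.toNat_of_nonneg hnn).symm, ?_, ?_, ?_⟩
  · rw [List.head?_drop] at hpre
    obtain ⟨hlen, -⟩ := List.getElem?_eq_some_iff.1 hpre
    exact hlen
  · cases hd : cs.drop n with
    | nil => rw [hd] at hpre; simp at hpre
    | cons x t =>
      rw [hd] at hpre; simp at hpre
      have ht : cs.drop (n + 1) = t := by
        have : (cs.drop n).drop 1 = cs.drop (n + 1) := List.drop_drop
        rw [hd] at this
        simpa using this.symm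
      rw [ht, hpre]
  · intro hc
    obtain ⟨i, hi, hie⟩ := List.mem_iff_getElem.1 hc
    have hilen : i < cs.length := by
      simp only [List.length_take] at hi; omega
    have hin : i < n := by
      simp only [List.length_take] at hi; omega
    apply hmin i hin
    rw [pvSingleton_prefix_iff, List.head?_drop, List.getElem?_eq_getElem hilen]
    rw [List.getElem_take] at hie
    rw [hie]

/-- The loop of A computes `plain ++ pvScan false rest`. -/
theorem pvLoopA_eq_scan (plain rest : List Char) :
    pvLoopA plain rest = plain ++ pvScan false rest := by
  induction hL : rest.length using Nat.strong_induction_on generalizing plain rest with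
  | _ L ih =>
  subst hL
  by_cases h0 : rest.length = 0
  · rw [pvLoopA]
    simp_all [List.length_eq_zero_iff.1 h0, pvScan]
  · rw [pvLoopA]; simp only [h0, dite_false]
    by_cases hmem : '(' ∈ rest
    · obtain ⟨n, hfind, hlt, hdropn, hnot⟩ := pvFind_single_spec hmem
      have hne : ¬ (PySem.Chars.find rest ['('] = -1) := by rw [hfind]; omega
      have hsplit : rest = rest.take n ++ '(' :: rest.drop (n + 1) := by
        conv_lhs => rw [← List.take_append_drop n rest]
        rw [hdropn]
      set b := rest.drop (n + 1) with hb
      have hff := PySem.Chars.findFrom_natCast rest [')'] n (by omega)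
      rw [if_neg hne, hfind, Int.toNat_natCast]
      by_cases hcp : ')' ∈ b
      · -- close paren found at some index m in rest.drop n = '(' :: b
        obtain ⟨m, hmfind, hmlt, hmdrop, hmnot⟩ :=
          pvFind_single_spec (c := ')') (cs := rest.drop n) (by rw [hdropn]; simp [hcp])
        obtain ⟨k, rfl⟩ : ∃ k, m = k + 1 := by
          rcases m with _ | k
          · exfalso; rw [hdropn] at hmdrop; simp at hmdrop
          · exact ⟨k, rfl⟩
        have hbk : b.drop k = ')' :: b.drop (k + 1) := by
          have h1 : (rest.drop n).drop (k + 1) = b.drop k := by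
            rw [hdropn]; simp
          have h2 : (rest.drop n).drop (k + 2) = b.drop (k + 1) := by
            rw [hdropn]; simp
          rw [h1, h2] at hmdrop; exact hmdrop
        have hnotb : ')' ∉ b.take k := by
          intro hmem2
          apply hmnot
          rw [hdropn, List.take_succ_cons]
          exact List.mem_cons_of_mem _ hmem2
        have hbm : b = b.take k ++ ')' :: b.drop (k + 1) := by
          conv_lhs => rw [← List.take_append_drop k b]
          rw [hbk]
        have hfd : PySem.Chars.findFrom rest [')'] (n : Int) none = ((n + (k + 1) : Nat) : Int) := by
          rw [hff, hmfind]; simp; omega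
        rw [hfd, dif_neg (by omega), Int.toNat_natCast]
        have hdropnm : rest.drop (n + (k + 1) + 1) = b.drop (k + 1) := by
          rw [hb, List.drop_drop]; congr 1; omega
        rw [hdropnm]
        have hrec := ih (b.drop (k + 1)).length
          (by rw [← hdropnm]; simp; omega)
          (plain ++ rest.take n) (b.drop (k + 1)) rfl
        rw [hrec]
        have hscanb : pvScan true b = pvScan false (b.drop (k + 1)) := by
          conv_lhs => rw [hbm]
          exact pvScan_true_append hnotb
        conv_rhs => rw [hsplit]
        rw [pvScan_false_append hnot, hscanb]
        simp
      · -- no close paren: A breaks with plain'; scan drops the remainder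
        have hfd : PySem.Chars.findFrom rest [')'] (n : Int) none = -1 := by
          rw [hff]
          have : PySem.Chars.find (rest.drop n) [')'] = -1 := by
            rw [PySem.Chars.find_eq_neg_one_iff]
            intro hinf
            obtain ⟨x, y, hxy⟩ := hinf
            have : ')' ∈ rest.drop n := by rw [← hxy]; simp
            rw [hdropn] at this; simp at this
            exact hcp this
          simp [this]
        rw [hfd, dif_pos rfl]
        conv_rhs => rw [hsplit]
        rw [pvScan_false_append hnot, pvScan_true_of_not_mem hcp]
        simp
    · -- no '(' at all
      have : PySem.Chars.find rest ['('] = -1 := by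
        rw [PySem.Chars.find_eq_neg_one_iff]
        intro hinf
        obtain ⟨x, y, hxy⟩ := hinf
        exact hmem (by rw [← hxy]; simp)
      simp [this, pvScan_false_of_not_mem hmem]

/-- B's fold computes `(…, acc ++ pvScan ins cs)`. -/
theorem pvFoldB_eq_scan (cs : List Char) (ins : Bool) (acc : List Char) :
    (cs.foldl pvStepB (ins, acc)).2 = acc ++ pvScan ins cs := by
  induction cs generalizing ins acc with
  | nil => simp [pvScan]
  | cons c cs ih =>
    rw [List.foldl_cons]
    cases ins with
    | false =>
      by_cases hc : c = '('
      · rw [show pvStepB (false, acc) c = (true, acc) from by simp [pvStepB, hc], ih]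
        simp [pvScan, hc]
      · rw [show pvStepB (false, acc) c = (false, acc ++ [c]) from by simp [pvStepB, hc], ih]
        simp [pvScan, hc]
    | true =>
      by_cases hc : c = ')'
      · rw [show pvStepB (true, acc) c = (false, acc) from by simp [pvStepB, hc], ih]
        simp [pvScan, hc]
      · rw [show pvStepB (true, acc) c = (true, acc) from by simp [pvStepB, hc], ih]
        simp [pvScan, hc]

-- ===== VERDICT (by name: the statement is the Claim_ definition above) =====
theorem extract_plain_text_from_yrc_spec : Claim_equal_extract_plain_text_from_yrc := by
  intro s _
  unfold Spec_extract_plain_text_from_yrc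
  unfold extract_plain_text_from_yrc extract_plain_text_from_yrc_alt
  by_cases h : s.toList = []
  · simp [h]
  · simp only [h, if_false]
    rw [pvLoopA_eq_scan, pvFoldB_eq_scan]
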